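-- pv_equiv track=rewrite | github.com/superbunny38/2022-3CodingTestPrepTeam | Week4/반복순열/안정민.py | solve
-- ===== SOURCE A (Python) =====
-- def solve(n, p) -> int:
--     numDict = { n: 0 }
--
--     cnt = 0
--     now = n
--     while True:
--         next = getNextSeqNumber(now, p)
--         if next in numDict:
--             return numDict[next]
--
--         numDict[next] = numDict[now] + 1
--         now = next
--         cnt += 1
--
-- def getNextSeqNumber(prev, p) -> int:
--     nums = list(map(int, str(prev)))
--     return sum(map(lambda x: x**p, nums))
-- ===== SOURCE B (Python) =====
-- def solve(n, p) -> int: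
--     # Phase 1: walk the orbit keeping only the SET of seen values,
--     # until the next value has been seen before.
--     seen = {n}
--     cur = n
--     while True:
--         nxt = getNextSeqNumber(cur, p)
--         if nxt in seen:
--             break
--         seen.add(nxt)
--         cur = nxt
--     # Phase 2: nxt is the first value to repeat; its answer is the index of
--     # its first occurrence, recomputed by walking the orbit again from n.
--     i = 0
--     cur = n
--     while cur != nxt:
--         cur = getNextSeqNumber(cur, p)
--         i += 1
--     return i
--
-- def getNextSeqNumber(prev, p) -> int:
--     nums = list(map(int, str(prev)))
--     return sum(map(lambda x: x**p, nums))
-- ===== Notes on version B (the rewrite author's own statement) =====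
-- stated objective: alternative
-- what changed: A memoizes every value's first index in a dict and answers by one lookup; B keeps only a set of seen values to find the first repeated value, then recomputes its first index by a second walk of the orbit from n.
-- outside the precondition, e.g. on solve(1, -1): A returns 0, B returns 0
import Mathlib
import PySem

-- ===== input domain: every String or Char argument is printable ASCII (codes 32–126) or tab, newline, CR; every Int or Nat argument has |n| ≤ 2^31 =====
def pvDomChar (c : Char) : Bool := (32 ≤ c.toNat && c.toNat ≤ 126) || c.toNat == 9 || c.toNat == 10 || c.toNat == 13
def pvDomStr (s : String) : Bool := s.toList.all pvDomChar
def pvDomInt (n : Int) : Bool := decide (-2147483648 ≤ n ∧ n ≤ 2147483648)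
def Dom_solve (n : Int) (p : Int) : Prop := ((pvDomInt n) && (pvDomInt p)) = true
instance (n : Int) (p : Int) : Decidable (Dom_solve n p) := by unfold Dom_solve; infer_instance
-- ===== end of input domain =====

-- B replaces A's value→first-index dict by a set of seen values plus a second walk of the
-- orbit that recomputes the first index of the first repeated value (objective: alternative).
-- Both while-loops are ported with a large fuel bound; on fuel exhaustion both ports return 0.

-- ===== PORT A =====
-- step helper shared by both Pythons: getNextSeqNumber(prev, p).
-- int(c) is ported as (PySem.Int.ofChars? [c]).getD 0 — exact for prev ≥ 0 (Pre_solve; for a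
-- negative prev Python raises ValueError on '-'); x**p is ported as x ^ p.toNat — exact for
-- p ≥ 0 (Pre_solve; for p < 0 Python produces floats / raises ZeroDivisionError).
def getNextSeqNumber (prev p : Int) : Int :=
  let nums := (PySem.Int.toChars prev).map fun c => (PySem.Int.ofChars? [c]).getD 0
  (nums.map fun x => x ^ p.toNat).sum

-- the 'while True' loop of A (the Python's variable 'cnt' is never read and is dropped)
def solveLoopA (p : Int) : Nat → PySem.Dict Int Int → Int → Int
  | 0, _, _ => 0
  | fuel+1, d, now =>
    let next := getNextSeqNumber now p
    if d.contains next then d.getD next 0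
    else solveLoopA p fuel (d.insert next (d.getD now 0 + 1)) next

def solve (n : Int) (p : Int) : Int :=
  solveLoopA p 1000000000 ((PySem.Dict.empty).insert n 0) n

-- ===== PORT B =====
-- phase 1 of B: walk the orbit with a set of seen values until the next value repeats
def seenLoopB (p : Int) : Nat → PySem.Set Int → Int → Option Int
  | 0, _, _ => none
  | fuel+1, seen, cur =>
    let nxt := getNextSeqNumber cur p
    if PySem.Set.contains seen nxt then some nxt
    else seenLoopB p fuel (PySem.Set.add seen nxt) nxt

-- phase 2 of B: 'i = 0; cur = n; while cur != v: cur = getNextSeqNumber(cur, p); i += 1'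
def countLoopB (p v : Int) : Nat → Int → Int → Int
  | 0, i, _ => i
  | fuel+1, i, cur =>
    if cur = v then i else countLoopB p v fuel (i + 1) (getNextSeqNumber cur p)

def solve_alt (n : Int) (p : Int) : Int :=
  match seenLoopB p 1000000000 (PySem.Set.ofList [n]) n with
  | none => 0
  | some v => countLoopB p v 1000000000 0 n

-- ===== PRECONDITION & SPEC =====
-- Pre_ excludes the inputs on which the Python computation leaves the ints: n < 0 (ValueError
-- from int('-')) and p < 0 (digit powers become floats, raising ValueError/ZeroDivisionError on
-- all such inputs except n = 1, where both A and B return the same value 0).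
def Pre_solve (n : Int) (p : Int) : Prop := 0 ≤ n ∧ 0 ≤ p
instance (n : Int) (p : Int) : Decidable (Pre_solve n p) := by unfold Pre_solve; infer_instance
def pvWitness_solve : Int × Int := (19, 2)

def Spec_solve (n : Int) (p : Int) (out : Int) : Prop := out = solve_alt n p
instance (n : Int) (p : Int) (out : Int) : Decidable (Spec_solve n p out) := by unfold Spec_solve; infer_instance

-- ===== CLAIM (what is proved, stated in full; the proofs are below) =====
def Claim_equal_solve : Prop := ∀ (n : Int) (p : Int), Dom_solve n p → Pre_solve n p → Spec_solve n p (solve n p)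

-- ===== LEMMAS AND PROOFS =====

-- the orbit of n under the step function
def orbit (n p : Int) : Nat → Int
  | 0 => n
  | k+1 => getNextSeqNumber (orbit n p k) p

-- the first c+1 orbit values, in order
def traj (n p : Int) (c : Nat) : List Int := (List.range (c+1)).map (orbit n p)

lemma traj_succ (n p : Int) (c : Nat) :
    traj n p (c+1) = traj n p c ++ [orbit n p (c+1)] := by
  simp [traj, List.range_succ]

lemma mem_traj {n p v : Int} {c : Nat} :
    v ∈ traj n p c ↔ ∃ j, j ≤ c ∧ orbit n p j = v := by
  simp only [traj, List.mem_map, List.mem_range]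
  constructor
  · rintro ⟨j, hj, rfl⟩; exact ⟨j, by omega, rfl⟩
  · rintro ⟨j, hj, rfl⟩; exact ⟨j, by omega, rfl⟩

lemma exists_of_mem_traj {n p v : Int} {c : Nat} (h : v ∈ traj n p c) :
    ∃ j, orbit n p j = v := by
  obtain ⟨j, _, hj⟩ := mem_traj.mp h; exact ⟨j, hj⟩

-- reference recursion shared by the two the proofs: A's loop viewed on the orbit
def specLoop (n p : Int) : Nat → Nat → Int
  | 0, _ => 0
  | fuel+1, c =>
    if h : orbit n p (c+1) ∈ traj n p c then
      ((Nat.find (exists_of_mem_traj h) : Nat) : Int)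
    else specLoop n p fuel (c+1)

-- B's phase-1 loop viewed on the orbit
def bRef (n p : Int) : Nat → Nat → Option Int
  | 0, _ => none
  | fuel+1, c =>
    if orbit n p (c+1) ∈ traj n p c then some (orbit n p (c+1))
    else bRef n p fuel (c+1)

lemma traj_nodup_succ {n p : Int} {c : Nat} (hnd : (traj n p c).Nodup)
    (hmem : orbit n p (c+1) ∉ traj n p c) : (traj n p (c+1)).Nodup := by
  rw [traj_succ, List.nodup_append]
  refine ⟨hnd, List.nodup_singleton _, ?_⟩
  intro a ha b hb heq
  rw [List.mem_singleton] at hb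
  subst hb
  subst heq
  exact hmem ha

lemma pair_mem_items {n p : Int} {c j : Nat} {d : PySem.Dict Int Int}
    (hd : d.items = (List.range (c+1)).map (fun i => (orbit n p i, (i : Int))))
    (hj : j ≤ c) : (orbit n p j, (j : Int)) ∈ d.items := by
  rw [hd]
  exact List.mem_map.mpr ⟨j, List.mem_range.mpr (by omega), rfl⟩

lemma keys_eq_traj {n p : Int} {c : Nat} {d : PySem.Dict Int Int}
    (hd : d.items = (List.range (c+1)).map (fun i => (orbit n p i, (i : Int)))) :
    d.keys = traj n p c := by
  simp only [PySem.Dict.keys, hd, traj, List.map_map]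
  rfl

lemma loopA_eq (n p : Int) : ∀ (fuel : Nat) (c : Nat) (d : PySem.Dict Int Int),
    d.items = (List.range (c+1)).map (fun i => (orbit n p i, (i : Int))) →
    (traj n p c).Nodup →
    solveLoopA p fuel d (orbit n p c) = specLoop n p fuel c := by
  intro fuel
  induction fuel with
  | zero => intro c d _ _; rfl
  | succ fuel ih =>
    intro c d hd hnd
    have hkeys : d.keys = traj n p c := keys_eq_traj hd
    have hknd : d.keys.Nodup := by rw [hkeys]; exact hnd
    have hstep : getNextSeqNumber (orbit n p c) p = orbit n p (c+1) := rfl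
    simp only [solveLoopA, hstep, specLoop]
    by_cases hmem : orbit n p (c+1) ∈ traj n p c
    · have hcont : d.contains (orbit n p (c+1)) = true := by
        rw [PySem.Dict.contains_eq_decide_mem_keys, hkeys]
        exact decide_eq_true hmem
      rw [if_pos hcont, dif_pos hmem]
      -- the dict maps the value to its least orbit index
      set j0 := Nat.find (exists_of_mem_traj hmem) with hj0
      have hspec : orbit n p j0 = orbit n p (c+1) := Nat.find_spec (exists_of_mem_traj hmem)
      have hle : j0 ≤ c := by
        obtain ⟨j, hjc, hj⟩ := mem_traj.mp hmem
        exact le_trans (Nat.find_min' _ hj) hjc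
      have h1 := pair_mem_items hd hle
      rw [hspec] at h1
      exact PySem.Dict.getD_of_mem_items d h1 hknd (0 : Int)
    · have hcont : d.contains (orbit n p (c+1)) = false := by
        rw [PySem.Dict.contains_eq_decide_mem_keys, hkeys]
        exact decide_eq_false hmem
      rw [if_neg (by simp [hcont]), dif_neg hmem]
      have hgetnow : d.getD (orbit n p c) 0 = (c : Int) :=
        PySem.Dict.getD_of_mem_items d (pair_mem_items hd le_rfl) hknd (0 : Int)
      have hitems' :
          (d.insert (orbit n p (c+1)) (d.getD (orbit n p c) 0 + 1)).items =
            (List.range (c+1+1)).map (fun i => (orbit n p i, (i : Int))) := by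
        rw [PySem.Dict.items_insert_of_not_contains d _ hcont, hgetnow, hd]
        conv_rhs => rw [List.range_succ]
        rw [List.map_append]
        have hcast : ((c : Int) + 1) = ((c + 1 : Nat) : Int) := by push_cast; ring
        rw [hcast]
        simp
      exact ih (c+1) _ hitems' (traj_nodup_succ hnd hmem)

lemma loopB_eq (n p : Int) : ∀ (fuel : Nat) (c : Nat) (s : PySem.Set Int),
    s = traj n p c →
    seenLoopB p fuel s (orbit n p c) = bRef n p fuel c := by
  intro fuel
  induction fuel with
  | zero => intro c s _; rfl
  | succ fuel ih =>
    intro c s hs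
    have hstep : getNextSeqNumber (orbit n p c) p = orbit n p (c+1) := rfl
    simp only [seenLoopB, hstep, bRef]
    by_cases hmem : orbit n p (c+1) ∈ traj n p c
    · rw [if_pos (by rw [hs]; simp [PySem.Set.contains, hmem]), if_pos hmem]
    · rw [if_neg (by rw [hs]; simp [PySem.Set.contains, hmem]), if_neg hmem]
      exact ih (c+1) _ (by rw [hs]; simp [PySem.Set.add, PySem.Set.contains, hmem, traj_succ])

lemma countLoopB_eq (n p v : Int) (j0 : Nat) (h0 : orbit n p j0 = v)
    (hmin : ∀ j, j < j0 → orbit n p j ≠ v) :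
    ∀ (fuel i : Nat), i ≤ j0 → j0 - i < fuel →
      countLoopB p v fuel (i : Int) (orbit n p i) = (j0 : Int) := by
  intro fuel
  induction fuel with
  | zero => intro i _ h; omega
  | succ fuel ih =>
    intro i hi hf
    simp only [countLoopB]
    by_cases heq : orbit n p i = v
    · have : i = j0 := by
        by_contra hne
        exact hmin i (by omega) heq
      rw [if_pos heq, this]
    · have hlt : i < j0 := by
        rcases Nat.lt_or_ge i j0 with h | h
        · exact h
        · exact absurd (hi.antisymm h ▸ h0) heq
      rw [if_neg heq]
      have : ((i : Int) + 1) = ((i+1 : Nat) : Int) := by push_cast; ring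
      rw [this]
      have hrec : getNextSeqNumber (orbit n p i) p = orbit n p (i+1) := rfl
      rw [hrec]
      exact ih (i+1) (by omega) (by omega)

lemma spec_eq_b (n p : Int) (F : Nat) : ∀ (fuel c : Nat),
    (traj n p c).Nodup → c + fuel ≤ F →
    specLoop n p fuel c =
      (match bRef n p fuel c with
        | none => 0
        | some v => countLoopB p v F 0 n) := by
  intro fuel
  induction fuel with
  | zero => intro c _ _; rfl
  | succ fuel ih =>
    intro c hnd hF
    simp only [specLoop, bRef]
    by_cases hmem : orbit n p (c+1) ∈ traj n p c
    · rw [dif_pos hmem, if_pos hmem]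
      set j0 := Nat.find (exists_of_mem_traj hmem) with hj0
      have hspec : orbit n p j0 = orbit n p (c+1) := Nat.find_spec (exists_of_mem_traj hmem)
      have hle : j0 ≤ c := by
        obtain ⟨j, hjc, hj⟩ := mem_traj.mp hmem
        exact le_trans (Nat.find_min' _ hj) hjc
      have hmin : ∀ j, j < j0 → orbit n p j ≠ orbit n p (c+1) := fun j hj => Nat.find_min _ hj
      have := countLoopB_eq n p (orbit n p (c+1)) j0 hspec hmin F 0 (by omega) (by omega)
      simp only [Nat.cast_zero] at this
      have h0 : orbit n p 0 = n := rfl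
      rw [h0] at this
      exact this.symm
    · rw [dif_neg hmem, if_neg hmem]
      exact ih (c+1) (traj_nodup_succ hnd hmem) (by omega)

-- ===== VERDICT (by name: the statement is the Claim_ definition above) =====
theorem solve_spec : Claim_equal_solve := by
  intro n p _ _
  unfold Spec_solve solve solve_alt
  have h0 : n = orbit n p 0 := rfl
  have hitems0 : ((PySem.Dict.empty (κ := Int) (ν := Int)).insert n 0).items =
      (List.range (0+1)).map (fun i => (orbit n p i, (i : Int))) := by
    rfl
  have hnd0 : (traj n p 0).Nodup := by simp [traj, List.range_one]
  have hA := loopA_eq n p 1000000000 0 _ hitems0 hnd0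
  have hB := loopB_eq n p 1000000000 0 (PySem.Set.ofList [n]) (by simp [PySem.Set.ofList, traj]; rfl)
  have hS := spec_eq_b n p 1000000000 1000000000 0 hnd0 (by omega)
  rw [show solveLoopA p 1000000000 ((PySem.Dict.empty).insert n 0) n
        = solveLoopA p 1000000000 ((PySem.Dict.empty).insert n 0) (orbit n p 0) from rfl,
      hA, hS]
  rw [show seenLoopB p 1000000000 (PySem.Set.ofList [n]) n
        = seenLoopB p 1000000000 (PySem.Set.ofList [n]) (orbit n p 0) from rfl, hB]
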